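-- pv_equiv track=rewrite | github.com/Delafu7/EjerciciosLogicos-Python | Nivel Medio/Escalera.py | escalera
-- ===== SOURCE A (Python) =====
-- def escalera(numEscalones:int):
--     if isinstance(numEscalones,int):
--         escalones=""
--         if numEscalones > 0:
--             for j in range((numEscalones+1)*2+1):
--                 if (numEscalones+1)*2==j:
--                     escalones+="_"
--                 else:
--                     escalones+=" "
--             for i in range(numEscalones+1):
--                 for j in range((numEscalones+1)*2):
--                     if j == (numEscalones+1)*2 - i*2:
--                         escalones+="_|"
--                     else:
--                         escalones+=" "
--                 escalones+="\n"
--         elif numEscalones < 0: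
--             numEscalones=-numEscalones
--             for j in range((numEscalones+1)*2+1,0, -1):
--                 if (numEscalones+1)*2+1==j:
--                     escalones+="_"
--                 else:
--                     escalones+=" "
--             escalones+="\n"
--             for i in range(numEscalones+1):
--                 for j in range((numEscalones+1)*2+1,2,-1):
--                     if j == (numEscalones+1)*2 - i*2:
--                         escalones+="|_"
--                     else:
--                         escalones+=" "
--                 escalones+="\n"
--         else:
--             escalones="__\n__"
--         return escalones
-- ===== SOURCE B (Python) =====
-- def escalera(numEscalones: int):
--     if not isinstance(numEscalones, int):
--         return None
--     n = numEscalones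
--     if n == 0:
--         return "__\n__"
--     if n > 0:
--         w = 2 * (n + 1)
--         lines = [" " * w + "_" + " " * w]
--         for i in range(1, n + 1):
--             p = w - 2 * i
--             lines.append(" " * p + "_|" + " " * (w - p - 1))
--         return "\n".join(lines) + "\n"
--     m = -n
--     w = 2 * (m + 1)
--     lines = ["_" + " " * w]
--     for i in range(m):
--         lines.append(" " * (2 * i + 1) + "|_" + " " * (w - 2 * i - 3))
--     lines.append(" " * (w - 1))
--     return "\n".join(lines) + "\n"
-- ===== Notes on version B (the rewrite author's own statement) =====
-- stated objective: simpler
-- what changed: A scans every column position of every row with nested character-by-character loops (testing each index against the marker position and appending one char at a time); B computes each row in closed form as ' '*p + marker + ' '*q, collects the rows in a list and joins them with newlines.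
import Mathlib
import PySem

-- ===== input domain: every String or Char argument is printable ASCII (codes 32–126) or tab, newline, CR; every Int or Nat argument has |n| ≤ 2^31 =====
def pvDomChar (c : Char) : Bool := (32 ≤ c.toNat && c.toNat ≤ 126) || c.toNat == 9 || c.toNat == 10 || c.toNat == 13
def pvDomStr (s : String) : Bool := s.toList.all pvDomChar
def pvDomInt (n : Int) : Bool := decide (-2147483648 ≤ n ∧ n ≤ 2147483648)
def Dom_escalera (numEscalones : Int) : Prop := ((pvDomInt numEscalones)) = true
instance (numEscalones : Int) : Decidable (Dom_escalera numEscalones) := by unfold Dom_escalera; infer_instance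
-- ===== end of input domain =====

-- B replaces A's per-character marker-scanning loops by closed-form rows (' '*p ++ marker ++ ' '*q) collected in a list and joined; objective: simpler.


-- ===== PORT A =====
-- literal port of A; the 'isinstance(numEscalones, int)' guard is statically true for an Int argument
def escalera (numEscalones : Int) : String :=
  if numEscalones > 0 then
    (PySem.List.pyRange 0 (numEscalones+1) 1).foldl
      (fun acc i =>
        ((PySem.List.pyRange 0 ((numEscalones+1)*2) 1).foldl
          (fun acc2 j => if j = (numEscalones+1)*2 - i*2 then acc2 ++ "_|" else acc2 ++ " ") acc) ++ "\n")
      ((PySem.List.pyRange 0 ((numEscalones+1)*2+1) 1).foldl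
        (fun acc j => if (numEscalones+1)*2 = j then acc ++ "_" else acc ++ " ") "")
  else if numEscalones < 0 then
    (PySem.List.pyRange 0 (-numEscalones+1) 1).foldl
      (fun acc i =>
        ((PySem.List.pyRange ((-numEscalones+1)*2+1) 2 (-1)).foldl
          (fun acc2 j => if j = (-numEscalones+1)*2 - i*2 then acc2 ++ "|_" else acc2 ++ " ") acc) ++ "\n")
      (((PySem.List.pyRange ((-numEscalones+1)*2+1) 0 (-1)).foldl
        (fun acc j => if (-numEscalones+1)*2+1 = j then acc ++ "_" else acc ++ " ") "") ++ "\n")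
  else "__\n__"

-- ===== PORT B =====
-- ' ' * k  (Python: a non-positive k gives "")
def pvSp (k : Int) : String := String.ofList (List.replicate k.toNat ' ')

def escalera_alt (numEscalones : Int) : String :=
  if numEscalones = 0 then "__\n__"
  else if numEscalones > 0 then
    PySem.Str.join "\n"
      ((pvSp (2*(numEscalones+1)) ++ "_" ++ pvSp (2*(numEscalones+1))) ::
        (PySem.List.pyRange 1 (numEscalones + 1) 1).map
          (fun i => pvSp (2*(numEscalones+1) - 2*i) ++ "_|"
              ++ pvSp (2*(numEscalones+1) - (2*(numEscalones+1) - 2*i) - 1))) ++ "\n"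
  else
    PySem.Str.join "\n"
      (("_" ++ pvSp (2*(-numEscalones+1))) ::
        ((PySem.List.pyRange 0 (-numEscalones) 1).map
          (fun i => pvSp (2*i+1) ++ "|_" ++ pvSp (2*(-numEscalones+1) - 2*i - 3))
         ++ [pvSp (2*(-numEscalones+1) - 1)])) ++ "\n"

-- ===== PRECONDITION & SPEC =====
def Spec_escalera (numEscalones : Int) (out : String) : Prop := out = escalera_alt numEscalones
instance (numEscalones : Int) (out : String) : Decidable (Spec_escalera numEscalones out) := by unfold Spec_escalera; infer_instance

-- ===== CLAIM (what is proved, stated in full; the proofs are below) =====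
def Claim_equal_escalera : Prop := ∀ (numEscalones : Int), Dom_escalera numEscalones → Spec_escalera numEscalones (escalera numEscalones)

-- ===== LEMMAS AND PROOFS =====

-- the common character-level shape of one staircase (positive / negative), mirroring B's rows
def pvPosChars (n : Int) : List Char :=
  (List.replicate (2*(n+1)).toNat ' ' ++ ['_'] ++ List.replicate (2*(n+1)).toNat ' ' ++ ['\n'])
  ++ ((PySem.List.pyRange 1 (n+1) 1).map (fun i =>
        List.replicate (2*(n+1) - 2*i).toNat ' ' ++ ['_', '|']
          ++ List.replicate (2*(n+1) - (2*(n+1) - 2*i) - 1).toNat ' ' ++ ['\n'])).flatten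

def pvNegChars (m : Int) : List Char :=
  (['_'] ++ List.replicate (2*(m+1)).toNat ' ' ++ ['\n'])
  ++ ((PySem.List.pyRange 0 m 1).map (fun i =>
        List.replicate (2*i+1).toNat ' ' ++ ['|', '_']
          ++ List.replicate (2*(m+1) - 2*i - 3).toNat ' ' ++ ['\n'])).flatten
  ++ (List.replicate (2*(m+1) - 1).toNat ' ' ++ ['\n'])

-- a string-appending fold, seen at the character level
theorem pv_foldl_append_toList {α : Type} (l : List α) (g : α → String) (acc : String) :
    (l.foldl (fun a x => a ++ g x) acc).toList
      = acc.toList ++ (l.map (fun x => (g x).toList)).flatten := by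
  induction l generalizing acc with
  | nil => simp
  | cons x t ih => simp [List.foldl_cons, ih, List.append_assoc]

-- shifting the accumulator out of a string-appending fold
theorem pv_foldl_append_shift {α : Type} (l : List α) (g : α → String) (acc : String) :
    l.foldl (fun a x => a ++ g x) acc = acc ++ l.foldl (fun a x => a ++ g x) "" := by
  apply String.toList_inj.mp
  simp [pv_foldl_append_toList]

-- normalising A's loop bodies: `if m = j then acc ++ s else acc ++ " "` appends one string
theorem pv_step_comm (m : Int) (s : String) :
    (fun (acc : String) (j : Int) => if m = j then acc ++ s else acc ++ " ")
      = (fun acc j => acc ++ (if j = m then s else " ")) := by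
  funext a j
  by_cases h : j = m
  · rw [if_pos h.symm, if_pos h]
  · rw [if_neg (fun hh => h hh.symm), if_neg h]

theorem pv_step_id (m : Int) (s : String) :
    (fun (acc : String) (j : Int) => if j = m then acc ++ s else acc ++ " ")
      = (fun acc j => acc ++ (if j = m then s else " ")) := by
  funext a j
  split <;> rfl

-- ascending marker scan: `for j in range(0, K): escalones += (mark if j == m else ' ')`
theorem pv_asc (m : Int) (mark : List Char) :
    ∀ (K : Int), 0 ≤ K →
    ((PySem.List.pyRange 0 K 1).map (fun j => if j = m then mark else [' '])).flatten
      = if 0 ≤ m ∧ m < K then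
          List.replicate m.toNat ' ' ++ mark ++ List.replicate (K - 1 - m).toNat ' '
        else List.replicate K.toNat ' ' := by
  intro K hK
  induction K, hK using Int.le_induction with
  | base => simp [PySem.List.pyRange_one_eq_nil]
  | succ K hK ih =>
    rw [PySem.List.pyRange_one_succ_right hK]
    simp only [List.map_append, List.flatten_append, ih, List.map_cons, List.map_nil,
      List.flatten_cons, List.flatten_nil, List.append_nil]
    by_cases hm : K = m
    · subst hm
      have h1 : ¬ (0 ≤ K ∧ K < K) := by omega
      have h2 : (0 ≤ K ∧ K < K + 1) := by omega
      simp only [if_neg h1, if_pos h2]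
      simp
    · rw [if_neg hm]
      by_cases h3 : 0 ≤ m ∧ m < K
      · have h4 : 0 ≤ m ∧ m < K + 1 := by omega
        simp only [if_pos h3, if_pos h4, List.append_assoc]
        have e : (K - m).toNat = (K - 1 - m).toNat + 1 := by omega
        simp only [show K + 1 - 1 - m = K - m by ring, e, List.replicate_succ']
      · have h4 : ¬ (0 ≤ m ∧ m < K + 1) := by omega
        simp only [if_neg h3, if_neg h4]
        have e : (K + 1).toNat = K.toNat + 1 := by omega
        simp only [e, List.replicate_succ']

-- descending marker scan: `for j in range(hi, b, -1): escalones += (mark if j == m else ' ')`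
theorem pv_desc (b m : Int) (mark : List Char) :
    ∀ (hi : Int), b ≤ hi →
    ((PySem.List.pyRange hi b (-1)).map (fun j => if j = m then mark else [' '])).flatten
      = if b < m ∧ m ≤ hi then
          List.replicate (hi - m).toNat ' ' ++ mark ++ List.replicate (m - b - 1).toNat ' '
        else List.replicate (hi - b).toNat ' ' := by
  intro hi hhi
  induction hi, hhi using Int.le_induction with
  | base => simp [PySem.List.pyRange_neg_one_eq_nil]
  | succ hi hge ih =>
    have hlt : b < hi + 1 := by omega
    rw [PySem.List.pyRange_neg_one_cons hlt]
    simp only [List.map_cons, List.flatten_cons, show hi + 1 - 1 = hi from by ring, ih]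
    by_cases hm : hi + 1 = m
    · have h1 : ¬ (b < m ∧ m ≤ hi) := by omega
      have h2 : b < m ∧ m ≤ hi + 1 := by omega
      rw [if_pos hm, if_neg h1, if_pos h2]
      have e1 : (hi + 1 - m).toNat = 0 := by omega
      have e2 : (hi - b).toNat = (m - b - 1).toNat := by omega
      simp [e1, e2]
    · rw [if_neg hm]
      by_cases h3 : b < m ∧ m ≤ hi
      · have h4 : b < m ∧ m ≤ hi + 1 := by omega
        rw [if_pos h3, if_pos h4]
        have : (hi + 1 - m).toNat = (hi - m).toNat + 1 := by omega
        simp [this, List.replicate_succ]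
      · have h4 : ¬ (b < m ∧ m ≤ hi + 1) := by omega
        rw [if_neg h3, if_neg h4]
        have : (hi + 1 - b).toNat = (hi - b).toNat + 1 := by omega
        simp [this, List.replicate_succ]

-- the two scans, packaged as statements about the string-level folds
theorem pv_scan_asc (K m : Int) (hK : 0 ≤ K) (s acc : String) :
    ((PySem.List.pyRange 0 K 1).foldl (fun a j => a ++ (if j = m then s else " ")) acc).toList
      = acc.toList ++ (if 0 ≤ m ∧ m < K then
          List.replicate m.toNat ' ' ++ s.toList ++ List.replicate (K - 1 - m).toNat ' '
        else List.replicate K.toNat ' ') := by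
  rw [pv_foldl_append_toList]
  have h : (fun (j : Int) => ((if j = m then s else " ") : String).toList)
      = (fun j => if j = m then s.toList else [' ']) := by
    funext j; split <;> rfl
  rw [h, pv_asc m s.toList K hK]

theorem pv_scan_desc (hi b m : Int) (h : b ≤ hi) (s acc : String) :
    ((PySem.List.pyRange hi b (-1)).foldl (fun a j => a ++ (if j = m then s else " ")) acc).toList
      = acc.toList ++ (if b < m ∧ m ≤ hi then
          List.replicate (hi - m).toNat ' ' ++ s.toList ++ List.replicate (m - b - 1).toNat ' '
        else List.replicate (hi - b).toNat ' ') := by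
  rw [pv_foldl_append_toList]
  have hfun : (fun (j : Int) => ((if j = m then s else " ") : String).toList)
      = (fun j => if j = m then s.toList else [' ']) := by
    funext j; split <;> rfl
  rw [hfun, pv_desc b m s.toList hi h]

-- '\n'.join(x :: xs) ++ '\n', at the character level
theorem pv_join_chars (x : List Char) (xs : List (List Char)) :
    PySem.Chars.join ['\n'] (x :: xs) ++ ['\n']
      = (x ++ ['\n']) ++ (xs.map (fun s => s ++ ['\n'])).flatten := by
  induction xs generalizing x with
  | nil => simp [PySem.Chars.join_singleton]
  | cons y t ih =>
    rw [PySem.Chars.join_cons_cons]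
    simp only [List.append_assoc, ih y, List.map_cons, List.flatten_cons]

-- ===== A's branches =====
theorem pv_A_pos (n : Int) (hn : 0 < n) : (escalera n).toList = pvPosChars n := by
  unfold escalera
  rw [if_pos hn, pv_step_comm]
  have houter : (fun (acc : String) (i : Int) =>
        ((PySem.List.pyRange 0 ((n+1)*2) 1).foldl
          (fun acc2 j => if j = (n+1)*2 - i*2 then acc2 ++ "_|" else acc2 ++ " ") acc) ++ "\n")
      = (fun acc i => acc ++
          (((PySem.List.pyRange 0 ((n+1)*2) 1).foldl
            (fun a j => a ++ (if j = (n+1)*2 - i*2 then "_|" else " ")) "") ++ "\n")) := by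
    funext a i
    rw [pv_step_id, pv_foldl_append_shift, String.append_assoc]
  rw [houter, pv_foldl_append_toList]
  rw [pv_scan_asc ((n+1)*2+1) ((n+1)*2) (by omega) "_" ""]
  rw [if_pos (by omega : (0:Int) ≤ (n+1)*2 ∧ (n+1)*2 < (n+1)*2+1)]
  rw [PySem.List.pyRange_one_append 0 1 (n+1) (by omega) (by omega)]
  rw [show PySem.List.pyRange 0 1 1 = [0] from PySem.List.pyRange_one_singleton 0]
  rw [List.map_append, List.flatten_append, List.map_cons, List.map_nil, List.flatten_cons,
    List.flatten_nil]
  have hrow0 : ((((PySem.List.pyRange 0 ((n+1)*2) 1).foldl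
        (fun a j => a ++ (if j = (n+1)*2 - 0*2 then "_|" else " ")) "") ++ "\n") : String).toList
      = List.replicate ((n+1)*2).toNat ' ' ++ ['\n'] := by
    rw [String.toList_append, pv_scan_asc ((n+1)*2) ((n+1)*2 - 0*2) (by omega) "_|" ""]
    rw [if_neg (by omega)]
    simp
  have hrows : (PySem.List.pyRange 1 (n+1) 1).map
        (fun i => ((((PySem.List.pyRange 0 ((n+1)*2) 1).foldl
          (fun a j => a ++ (if j = (n+1)*2 - i*2 then "_|" else " ")) "") ++ "\n") : String).toList)
      = (PySem.List.pyRange 1 (n+1) 1).map (fun i =>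
          List.replicate (2*(n+1) - 2*i).toNat ' ' ++ ['_', '|']
            ++ List.replicate (2*(n+1) - (2*(n+1) - 2*i) - 1).toNat ' ' ++ ['\n']) := by
    apply List.map_congr_left
    intro i hi
    rw [PySem.List.mem_pyRange_one] at hi
    rw [String.toList_append, pv_scan_asc ((n+1)*2) ((n+1)*2 - i*2) (by omega) "_|" ""]
    rw [if_pos (by omega)]
    have e1 : (n+1)*2 - i*2 = 2*(n+1) - 2*i := by ring
    rw [e1]
    have e2 : ((n+1)*2 - 1 - (2*(n+1) - 2*i)).toNat = (2*(n+1) - (2*(n+1) - 2*i) - 1).toNat := by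
      omega
    rw [e2]
    simp [List.append_assoc]
  rw [hrow0, hrows]
  unfold pvPosChars
  have e3 : ((n+1)*2).toNat = (2*(n+1)).toNat := by omega
  have e4 : ((n+1)*2+1-1-(n+1)*2).toNat = 0 := by omega
  rw [e3, e4]
  simp [List.append_assoc]

theorem pv_A_neg (n : Int) (hn : n < 0) : (escalera n).toList = pvNegChars (-n) := by
  unfold escalera
  rw [if_neg (by omega), if_pos hn, pv_step_comm]
  have houter : (fun (acc : String) (i : Int) =>
        ((PySem.List.pyRange ((-n+1)*2+1) 2 (-1)).foldl
          (fun acc2 j => if j = (-n+1)*2 - i*2 then acc2 ++ "|_" else acc2 ++ " ") acc) ++ "\n")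
      = (fun acc i => acc ++
          (((PySem.List.pyRange ((-n+1)*2+1) 2 (-1)).foldl
            (fun a j => a ++ (if j = (-n+1)*2 - i*2 then "|_" else " ")) "") ++ "\n")) := by
    funext a i
    rw [pv_step_id, pv_foldl_append_shift, String.append_assoc]
  rw [houter, pv_foldl_append_toList, String.toList_append]
  rw [pv_scan_desc ((-n+1)*2+1) 0 ((-n+1)*2+1) (by omega) "_" ""]
  rw [if_pos (by omega : (0:Int) < (-n+1)*2+1 ∧ (-n+1)*2+1 ≤ (-n+1)*2+1)]
  rw [PySem.List.pyRange_one_succ_right (by omega : (0:Int) ≤ -n)]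
  rw [List.map_append, List.flatten_append, List.map_cons, List.map_nil, List.flatten_cons,
    List.flatten_nil]
  have hrows : (PySem.List.pyRange 0 (-n) 1).map
        (fun i => ((((PySem.List.pyRange ((-n+1)*2+1) 2 (-1)).foldl
          (fun a j => a ++ (if j = (-n+1)*2 - i*2 then "|_" else " ")) "") ++ "\n") : String).toList)
      = (PySem.List.pyRange 0 (-n) 1).map (fun i =>
          List.replicate (2*i+1).toNat ' ' ++ ['|', '_']
            ++ List.replicate (2*(-n+1) - 2*i - 3).toNat ' ' ++ ['\n']) := by
    apply List.map_congr_left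
    intro i hi
    rw [PySem.List.mem_pyRange_one] at hi
    rw [String.toList_append, pv_scan_desc ((-n+1)*2+1) 2 ((-n+1)*2 - i*2) (by omega) "|_" ""]
    rw [if_pos (by omega)]
    have e1 : ((-n+1)*2+1 - ((-n+1)*2 - i*2)).toNat = (2*i+1).toNat := by omega
    have e2 : ((-n+1)*2 - i*2 - 2 - 1).toNat = (2*(-n+1) - 2*i - 3).toNat := by omega
    rw [e1, e2]
    simp [List.append_assoc]
  have hlast : ((((PySem.List.pyRange ((-n+1)*2+1) 2 (-1)).foldl
        (fun a j => a ++ (if j = (-n+1)*2 - (-n)*2 then "|_" else " ")) "") ++ "\n") : String).toList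
      = List.replicate (2*(-n+1) - 1).toNat ' ' ++ ['\n'] := by
    rw [String.toList_append, pv_scan_desc ((-n+1)*2+1) 2 ((-n+1)*2 - (-n)*2) (by omega) "|_" ""]
    rw [if_neg (by omega)]
    have e : ((-n+1)*2+1-2).toNat = (2*(-n+1) - 1).toNat := by omega
    simp [e]
  rw [hrows, hlast]
  unfold pvNegChars
  have e3 : ((-n+1)*2+1 - ((-n+1)*2+1)).toNat = 0 := by omega
  have e4 : ((-n+1)*2+1-0-1).toNat = (2*(-n+1)).toNat := by omega
  have e5 : (2*(-n+1)).toNat = (2*(-n+1)).toNat := rfl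
  rw [e3, e4]
  simp [List.append_assoc]

-- ===== B's branches =====
theorem pv_B_pos (n : Int) (hn : 0 < n) : (escalera_alt n).toList = pvPosChars n := by
  unfold escalera_alt
  rw [if_neg (by omega), if_pos hn]
  rw [String.toList_append, PySem.Str.toList_join]
  rw [show ("\n" : String).toList = ['\n'] from rfl]
  rw [List.map_cons, List.map_map]
  rw [pv_join_chars]
  unfold pvPosChars
  simp only [pvSp, List.map_map]
  refine congrArg₂ (· ++ ·) (by simp) ?_
  refine congrArg List.flatten (List.map_congr_left ?_)
  intro i _
  simp [List.append_assoc]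

theorem pv_B_neg (n : Int) (hn : n < 0) : (escalera_alt n).toList = pvNegChars (-n) := by
  unfold escalera_alt
  rw [if_neg (by omega), if_neg (by omega)]
  rw [String.toList_append, PySem.Str.toList_join]
  rw [show ("\n" : String).toList = ['\n'] from rfl]
  rw [List.map_cons, List.map_append, List.map_map]
  rw [pv_join_chars]
  unfold pvNegChars
  simp [pvSp, List.append_assoc]
  refine congrArg List.flatten (List.map_congr_left ?_)
  intro i _
  simp [List.append_assoc]

-- ===== VERDICT (by name: the statement is the Claim_ definition above) =====
theorem escalera_spec : Claim_equal_escalera := by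
  intro n _
  unfold Spec_escalera
  rcases lt_trichotomy n 0 with h | h | h
  · exact String.toList_inj.mp ((pv_A_neg n h).trans (pv_B_neg n h).symm)
  · subst h; rfl
  · exact String.toList_inj.mp ((pv_A_pos n h).trans (pv_B_pos n h).symm)
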